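-- pv_equiv track=rewrite | github.com/carla-simulator/carla | Co-Simulation/Sumo/sumo-1.7.0/tools/sumolib/scenario/scenarios/__init__.py | maxIndexValue_unset
-- ===== SOURCE A (Python) =====
-- def maxIndexValue_unset(l, l2):
--     i = 0
--     max_val = None
--     max_idx = -1
--     while i < len(l):
--         if l2[i] != 0:
--             i = i + 1
--             continue
--         if max_val is None or max_val < l[i]:
--             max_idx = i
--             max_val = l[i]
--         i = i + 1
--     return max_idx, max_val
-- ===== SOURCE B (Python) =====
-- def maxIndexValue_unset(l, l2):
--     candidates = [(v, i) for i, v in enumerate(l) if l2[i] == 0]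
--     if not candidates:
--         return -1, None
--     best = max(candidates, key=lambda c: c[0])
--     return best[1], best[0]
-- ===== Notes on version B (the rewrite author's own statement) =====
-- stated objective: simpler
-- what changed: Replaces the guarded index-tracking while loop with a filter-then-reduce: build the qualifying (value, index) pairs once, then take max keyed on the value alone (first max wins, matching A's strict <).
import Mathlib
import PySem

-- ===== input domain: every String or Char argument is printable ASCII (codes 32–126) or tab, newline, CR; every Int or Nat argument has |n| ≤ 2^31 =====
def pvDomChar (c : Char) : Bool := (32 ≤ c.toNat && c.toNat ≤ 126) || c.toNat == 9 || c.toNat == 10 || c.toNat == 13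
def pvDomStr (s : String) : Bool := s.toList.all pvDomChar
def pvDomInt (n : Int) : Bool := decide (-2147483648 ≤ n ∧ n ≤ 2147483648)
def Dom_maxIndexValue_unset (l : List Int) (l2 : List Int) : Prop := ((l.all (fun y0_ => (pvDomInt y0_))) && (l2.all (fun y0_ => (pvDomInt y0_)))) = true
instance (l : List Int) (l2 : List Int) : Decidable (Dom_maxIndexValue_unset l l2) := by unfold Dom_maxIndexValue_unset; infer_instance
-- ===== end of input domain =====

-- B replaces A's guarded index-tracking while loop by filter-then-reduce (qualifying pairs, then first max by value); objective: simpler.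


-- ===== PORT A =====
-- while loop of A: i runs over indices of l; l2[i] / l[i] via pyGet? (none = IndexError, excluded by Pre_)
def maxA_loop (l l2 : List Int) (i : Nat) (max_idx : Int) (max_val : Option Int) : Int × Option Int :=
  if i < l.length then
    match PySem.List.pyGet? l2 (i : Int) with
    | none => (max_idx, max_val)  -- IndexError; unreachable under Pre_
    | some c =>
      if c ≠ 0 then maxA_loop l l2 (i + 1) max_idx max_val
      else
        match PySem.List.pyGet? l (i : Int) with
        | none => (max_idx, max_val)  -- unreachable: i < len l
        | some v =>
          match max_val with
          | none => maxA_loop l l2 (i + 1) (i : Int) (some v)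
          | some m =>
            if m < v then maxA_loop l l2 (i + 1) (i : Int) (some v)
            else maxA_loop l l2 (i + 1) max_idx max_val
  else (max_idx, max_val)
termination_by l.length - i

def maxIndexValue_unset (l : List Int) (l2 : List Int) : Int × Option Int :=
  maxA_loop l l2 0 (-1) none

-- ===== PORT B =====
def maxIndexValue_unset_alt (l : List Int) (l2 : List Int) : Int × Option Int :=
  let candidates := (PySem.List.enumerate l).filterMap (fun p =>
    match PySem.List.pyGet? l2 p.1 with
    | none => none  -- IndexError in the comprehension; unreachable under Pre_
    | some c => if c = 0 then some (p.2, p.1) else none)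
  match PySem.List.max? candidates (fun c => c.1) with
  | none => (-1, none)
  | some best => (best.2, some best.1)

-- ===== PRECONDITION & SPEC =====
-- Pre_ excludes exactly the inputs where the Python A raises IndexError (l2 shorter than l).
def Pre_maxIndexValue_unset (l : List Int) (l2 : List Int) : Prop := l.length ≤ l2.length
instance (l : List Int) (l2 : List Int) : Decidable (Pre_maxIndexValue_unset l l2) := by unfold Pre_maxIndexValue_unset; infer_instance
def pvWitness_maxIndexValue_unset : List Int × List Int := ([3, 1, 3, 2], [0, 0, 0, 1])
def Spec_maxIndexValue_unset (l : List Int) (l2 : List Int) (out : Int × Option Int) : Prop := out = maxIndexValue_unset_alt l l2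
instance (l : List Int) (l2 : List Int) (out : Int × Option Int) : Decidable (Spec_maxIndexValue_unset l l2 out) := by unfold Spec_maxIndexValue_unset; infer_instance

-- ===== CLAIM =====
def Claim_equal_maxIndexValue_unset : Prop := ∀ (l : List Int) (l2 : List Int), Dom_maxIndexValue_unset l l2 → Pre_maxIndexValue_unset l l2 → Spec_maxIndexValue_unset l l2 (maxIndexValue_unset l l2)

-- ===== LEMMAS AND PROOFS =====
-- the fold step of PySem.List.max? with key = fst
def mstep (acc : Option (Int × Int)) (x : Int × Int) : Option (Int × Int) :=
  match acc with
  | none => some x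
  | some m => if m.1 < x.1 then some x else some m

def outW (mi : Int) (mv : Option Int) (o : Option (Int × Int)) : Int × Option Int :=
  match o with
  | none => (mi, mv)
  | some b => (b.2, some b.1)

-- candidates of the suffix of l starting at index i, as (value, index) pairs
def candFrom (l l2 : List Int) (i : Nat) : List (Int × Int) :=
  if i < l.length then
    (if l2.getD i 0 = 0 then [(l.getD i 0, (i : Int))] else []) ++ candFrom l l2 (i + 1)
  else []
termination_by l.length - i

lemma foldl_mstep_some (cs : List (Int × Int)) (x : Int × Int) :
    ∃ y, List.foldl mstep (some x) cs = some y := by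
  induction cs generalizing x with
  | nil => exact ⟨x, rfl⟩
  | cons c t ih =>
    simp only [List.foldl_cons, mstep]
    split <;> exact ih _

lemma loop_eq (l l2 : List Int) (h : l.length ≤ l2.length) :
    ∀ n i mi mv, l.length - i ≤ n → maxA_loop l l2 i mi mv =
      outW mi mv (List.foldl mstep (mv.map (fun m => (m, mi))) (candFrom l l2 i)) := by
  intro n
  induction n with
  | zero =>
    intro i mi mv hn
    have hge : ¬ i < l.length := by omega
    rw [maxA_loop, candFrom]
    simp only [hge, if_neg, not_false_eq_true, List.foldl_nil]
    cases mv <;> rfl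
  | succ n IH => ?_
  intro i mi mv hn
  rw [maxA_loop, candFrom]
  by_cases hi : i < l.length
  · have hi2 : i < l2.length := lt_of_lt_of_le hi h
    have hg2 : PySem.List.pyGet? l2 (i : Int) = some (l2.getD i 0) := by
      rw [PySem.List.pyGet?_natCast, List.getD, List.getElem?_eq_getElem hi2]; rfl
    have hg1 : PySem.List.pyGet? l (i : Int) = some (l.getD i 0) := by
      rw [PySem.List.pyGet?_natCast, List.getD, List.getElem?_eq_getElem hi]; rfl
    simp only [hi, if_pos, hg2, hg1]
    by_cases hc : l2.getD i 0 = 0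
    · simp only [hc, ne_eq, not_true_eq_false, if_neg, if_pos, List.singleton_append,
        List.foldl_cons, not_false_eq_true]
      cases mv with
      | none =>
        rw [IH (i + 1) _ _ (by omega)]
        simp only [Option.map_none, Option.map_some, mstep]
        obtain ⟨y, hy⟩ := foldl_mstep_some (candFrom l l2 (i + 1)) (l.getD i 0, (i : Int))
        rw [hy]
        rfl
      | some m =>
        simp only [Option.map_some, mstep]
        by_cases hm : m < l.getD i 0
        · simp only [hm, if_pos]
          rw [IH (i + 1) _ _ (by omega)]
          simp only [Option.map_some]
          obtain ⟨y, hy⟩ := foldl_mstep_some (candFrom l l2 (i + 1)) (l.getD i 0, (i : Int))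
          rw [hy]
          rfl
        · simp only [hm, if_neg, not_false_eq_true]
          rw [IH (i + 1) _ _ (by omega)]
          simp only [Option.map_some]
    · simp only [hc, ite_false, List.nil_append, ne_eq, not_false_eq_true, if_pos]
      exact IH (i + 1) mi mv (by omega)
  · simp only [hi, if_neg, not_false_eq_true, List.foldl_nil]
    cases mv <;> rfl

lemma filterMap_enum_eq (l0 l2 : List Int) (h : l0.length ≤ l2.length) :
    ∀ (t : List Int) (i : Nat), l0.drop i = t →
      (PySem.List.enumerate t (i : Int)).filterMap (fun p =>
        match PySem.List.pyGet? l2 p.1 with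
        | none => none
        | some c => if c = 0 then some (p.2, p.1) else none)
      = candFrom l0 l2 i := by
  intro t
  induction t with
  | nil =>
    intro i hd
    have : l0.length ≤ i := by
      by_contra hlt
      have := List.drop_eq_nil_iff.mp hd
      omega
    rw [candFrom]
    simp [Nat.not_lt.mpr this, PySem.List.enumerate]
  | cons x ts ih =>
    intro i hd
    have hi : i < l0.length := by
      by_contra hge
      simp [List.drop_eq_nil_iff.mpr (by omega : l0.length ≤ i)] at hd
    have hx : l0[i]? = some x := by
      have h0 : (l0.drop i)[0]? = some x := by rw [hd]; rfl
      simpa [List.getElem?_drop] using h0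
    have hts : l0.drop (i + 1) = ts := by
      have h1 : (l0.drop i).tail = ts := by rw [hd]; rfl
      rwa [List.tail_drop] at h1
    have hi2 : i < l2.length := lt_of_lt_of_le hi h
    have hg2 : PySem.List.pyGet? l2 (i : Int) = some (l2.getD i 0) := by
      rw [PySem.List.pyGet?_natCast, List.getD, List.getElem?_eq_getElem hi2]; rfl
    rw [candFrom]
    simp only [hi, if_pos, PySem.List.enumerate, List.filterMap_cons, hg2]
    have hrec := ih (i + 1) hts
    push_cast at hrec ⊢
    rw [hrec]
    simp only [List.getD]
    by_cases hc : l2[i]?.getD 0 = 0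
    · simp [hc, hx]
    · simp [hc]

lemma max?_eq_foldl (cs : List (Int × Int)) :
    PySem.List.max? cs (fun c => c.1) = List.foldl mstep none cs := by
  rw [PySem.List.max?]
  congr 1
  funext acc x
  cases acc <;> rfl

-- ===== VERDICT =====
theorem maxIndexValue_unset_spec : Claim_equal_maxIndexValue_unset := by
  intro l l2 _hdom hpre
  unfold Spec_maxIndexValue_unset maxIndexValue_unset
  rw [loop_eq l l2 hpre l.length 0 (-1) none (by omega)]
  have hc0 := filterMap_enum_eq l l2 hpre l 0 (by simp)
  norm_num at hc0
  unfold maxIndexValue_unset_alt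
  simp only [hc0, max?_eq_foldl, Option.map_none]
  cases List.foldl mstep none (candFrom l l2 0) <;> simp [outW]
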